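-- pv_equiv track=rewrite | github.com/yacinebenchehida/Inversion_Chetone_Eresia | SnpEff/exonerate_to_gtf.py | calculate_phases
-- ===== SOURCE A (Python) =====
-- def calculate_phases(cds_coords, strand):
--     """
--     Calculate phases for each CDS based on concatenated CDS length.
--     Args:
--         cds_coords: list of (start, end) tuples sorted in transcription order
--         strand: '+' or '-'
--     Returns:
--         List of phases (0,1,2) corresponding to each CDS in order
--     """
--     phases = []  # list to store phases
--     length_sum = 0  # cumulative CDS length counter
--     for start, end in cds_coords:  # iterate over CDS coords
--         phases.append(length_sum % 3)  # current phase is cumulative length mod 3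
--         exon_len = end - start + 1  # calculate exon length
--         length_sum += exon_len  # update cumulative length
--     return phases  # return list of phases
-- ===== SOURCE B (Python) =====
-- def calculate_phases(cds_coords, strand):
--     """Recursive divide: phases of the tail (computed as if starting at phase 0)
--     are shifted by the first CDS length mod 3; a 0 is prepended for the head."""
--     if not cds_coords:
--         return []
--     start, end = cds_coords[0]
--     shift = (end - start + 1) % 3
--     return [0] + [(shift + p) % 3 for p in calculate_phases(cds_coords[1:], strand)]
-- ===== Notes on version B (the rewrite author's own statement) =====
-- stated objective: alternative
-- what changed: Replaces A's left-to-right accumulator loop with a structural recursion: the tail's phases are computed independently (as if starting at 0) and shifted by the head CDS length mod 3, with 0 prepended.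
import Mathlib
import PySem

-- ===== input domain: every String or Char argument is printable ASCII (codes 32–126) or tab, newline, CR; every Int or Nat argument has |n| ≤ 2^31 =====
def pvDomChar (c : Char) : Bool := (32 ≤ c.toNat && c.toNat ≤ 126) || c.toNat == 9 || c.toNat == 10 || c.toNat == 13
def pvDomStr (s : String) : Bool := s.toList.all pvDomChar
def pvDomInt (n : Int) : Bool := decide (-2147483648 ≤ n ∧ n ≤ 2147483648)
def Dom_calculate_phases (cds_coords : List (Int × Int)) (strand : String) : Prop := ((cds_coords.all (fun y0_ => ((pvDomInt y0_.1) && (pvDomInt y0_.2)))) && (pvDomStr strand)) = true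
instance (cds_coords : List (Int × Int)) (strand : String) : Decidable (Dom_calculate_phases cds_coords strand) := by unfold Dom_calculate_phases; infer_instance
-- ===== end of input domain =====

-- B replaces A's accumulator loop with a structural recursion that shifts the tail's phases by the head length mod 3 (alternative decomposition; return value only).


-- ===== PORT A =====
-- A's for-loop over cds_coords carrying (phases, length_sum)
def pvALoop : List (Int × Int) → List Int → Int → List Int
  | [], phases, _ => phases
  | (start, «end») :: rest, phases, length_sum =>
      pvALoop rest (phases ++ [PySem.Int.mod length_sum 3]) (length_sum + («end» - start + 1))

def calculate_phases (cds_coords : List (Int × Int)) (strand : String) : List Int :=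
  pvALoop cds_coords [] 0

-- ===== PORT B =====
-- B's recursion: phases of the tail shifted by the head length mod 3, 0 prepended
def calculate_phases_alt (cds_coords : List (Int × Int)) (strand : String) : List Int :=
  match cds_coords with
  | [] => []
  | (start, «end») :: rest =>
      let shift := PySem.Int.mod («end» - start + 1) 3
      0 :: (calculate_phases_alt rest strand).map (fun p => PySem.Int.mod (shift + p) 3)

-- ===== PRECONDITION & SPEC =====
def Spec_calculate_phases (cds_coords : List (Int × Int)) (strand : String) (out : List Int) : Prop := out = calculate_phases_alt cds_coords strand
instance (cds_coords : List (Int × Int)) (strand : String) (out : List Int) : Decidable (Spec_calculate_phases cds_coords strand out) := by unfold Spec_calculate_phases; infer_instance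

-- ===== CLAIM =====
def Claim_equal_calculate_phases : Prop := ∀ (cds_coords : List (Int × Int)) (strand : String), Dom_calculate_phases cds_coords strand → Spec_calculate_phases cds_coords strand (calculate_phases cds_coords strand)

-- ===== LEMMAS AND PROOFS =====

theorem pvMod3 (t : Int) : PySem.Int.mod t 3 = t % 3 :=
  PySem.Int.mod_eq_emod_of_pos (by norm_num)

theorem pvALoop_append (cs : List (Int × Int)) :
    ∀ (phases : List Int) (t : Int), pvALoop cs phases t = phases ++ pvALoop cs [] t := by
  induction cs with
  | nil => intro phases t; simp [pvALoop]
  | cons c rest ih =>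
      intro phases t
      obtain ⟨s, e⟩ := c
      rw [pvALoop, pvALoop, ih, ih ([] ++ [PySem.Int.mod t 3])]
      simp

-- strand is never inspected by B
theorem pvAltStrand (cs : List (Int × Int)) (s : String) :
    calculate_phases_alt cs s = calculate_phases_alt cs "" := by
  induction cs with
  | nil => rfl
  | cons c rest ih => obtain ⟨a, b⟩ := c; simp [calculate_phases_alt, ih]

-- every phase B produces lies in [0, 3)
theorem pvAltRange (cs : List (Int × Int)) (s : String) :
    ∀ p ∈ calculate_phases_alt cs s, 0 ≤ p ∧ p < 3 := by
  induction cs with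
  | nil => simp [calculate_phases_alt]
  | cons c rest ih =>
      obtain ⟨a, b⟩ := c
      simp only [calculate_phases_alt, List.mem_cons, List.mem_map]
      rintro p (rfl | ⟨q, hq, rfl⟩)
      · omega
      · rw [pvMod3]; omega

theorem pvALoop_alt (cs : List (Int × Int)) :
    ∀ (t : Int), pvALoop cs [] t =
      (calculate_phases_alt cs "").map (fun p => PySem.Int.mod (t + p) 3) := by
  induction cs with
  | nil => intro t; simp [pvALoop, calculate_phases_alt]
  | cons c rest ih =>
      intro t
      obtain ⟨s, e⟩ := c
      rw [pvALoop, pvALoop_append, ih]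
      simp only [calculate_phases_alt, List.map_cons, List.map_map, List.nil_append,
        List.singleton_append, List.cons.injEq]
      refine ⟨by rw [pvMod3, pvMod3]; omega, ?_⟩
      apply List.map_congr_left
      intro p _
      simp only [Function.comp_apply, pvMod3]
      omega

-- ===== VERDICT =====
theorem calculate_phases_spec : Claim_equal_calculate_phases := by
  intro cds strand _
  unfold Spec_calculate_phases calculate_phases
  rw [pvALoop_alt, pvAltStrand cds strand]
  conv_rhs => rw [← List.map_id (calculate_phases_alt cds "")]
  apply List.map_congr_left
  intro p hp
  have h := pvAltRange cds "" p hp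
  rw [pvMod3]
  simp only [id]
  omega
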